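-- pv_equiv track=rewrite | github.com/linlin-coder/STPG | src/lib/public_method.py | get_succeeds
-- ===== SOURCE A (Python) =====
-- def get_succeeds(job,order_relation):
--     recursiveSucceeds = [job]
--     succeeds = []
--     if job in order_relation:
--         succeeds = order_relation[job]
--     if len(succeeds) >0:
--         for each in succeeds:
--             recursiveSucceeds.extend(get_succeeds(each,order_relation))
--     return recursiveSucceeds
-- ===== SOURCE B (Python) =====
-- def get_succeeds(job, order_relation):
--     # Iterative pre-order DFS with an explicit LIFO stack (same sequence,
--     # including per-path duplicates, as the recursive original).
--     result = []
--     stack = [job]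
--     while stack:
--         node = stack.pop()
--         result.append(node)
--         if node in order_relation:
--             stack.extend(reversed(order_relation[node]))
--     return result
-- ===== Notes on version B (the rewrite author's own statement) =====
-- stated objective: alternative
-- what changed: The recursive pre-order DFS is replaced by an iterative loop with an explicit LIFO stack (successors pushed in reversed order), producing the identical sequence without Python recursion; Pre_ excludes only relations with a cycle reachable from job, on which A raises RecursionError and B's loop does not terminate.
import Mathlib
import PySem

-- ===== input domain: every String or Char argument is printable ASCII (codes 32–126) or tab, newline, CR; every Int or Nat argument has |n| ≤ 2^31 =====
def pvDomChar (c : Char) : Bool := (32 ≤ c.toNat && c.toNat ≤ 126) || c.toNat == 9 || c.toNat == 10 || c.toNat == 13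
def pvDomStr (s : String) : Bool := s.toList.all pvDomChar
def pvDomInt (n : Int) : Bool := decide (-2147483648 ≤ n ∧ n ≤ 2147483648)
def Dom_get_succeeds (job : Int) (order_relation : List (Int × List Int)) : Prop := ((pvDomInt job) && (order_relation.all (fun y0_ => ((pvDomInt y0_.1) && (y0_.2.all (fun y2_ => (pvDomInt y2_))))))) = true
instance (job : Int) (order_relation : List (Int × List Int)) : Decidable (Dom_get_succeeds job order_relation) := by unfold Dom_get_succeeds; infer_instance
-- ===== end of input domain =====

-- B replaces A's recursive pre-order DFS by an explicit-stack loop producing the identical sequence (alternative decomposition).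
-- ===== PORT A =====
-- Python recursion carried as structural recursion on a fuel argument; under Pre_ (no cycle
-- reachable from job) fuel `rel.length + 1` exceeds the depth of the DFS tree, so the
-- fuel-exhaustion branch is unreachable on admitted inputs.
def get_succeedsGo (order_relation : List (Int × List Int)) : Nat → Int → List Int
  | 0, job => [job]
  | n + 1, job =>
    let recursiveSucceeds : List Int := [job]
    let succeeds : List Int :=
      if (PySem.Dict.mk order_relation).contains job
      then (PySem.Dict.mk order_relation).getD job [] else []
    if succeeds.length > 0 then
      succeeds.foldl (fun acc each => acc ++ get_succeedsGo order_relation n each) recursiveSucceeds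
    else recursiveSucceeds

def get_succeeds (job : Int) (order_relation : List (Int × List Int)) : List Int :=
  get_succeedsGo order_relation (order_relation.length + 1) job

-- ===== PORT B =====
-- Fuel bound for the while-loop (pure totality guard): under Pre_ it equals the exact number
-- of loop iterations (= the number of nodes emitted).
def get_succeedsSize (order_relation : List (Int × List Int)) : Nat → Int → Nat
  | 0, _ => 1
  | n + 1, x =>
    ((PySem.Dict.mk order_relation).getD x []).foldl
      (fun acc e => acc + get_succeedsSize order_relation n e) 1

-- the while-loop of Source B: stack head = Python's stack top; pushing the reversed successor
-- list so that the leftmost successor is on top = prepending the successor list.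
def get_succeedsLoop (order_relation : List (Int × List Int)) : Nat → List Int → List Int → List Int
  | _, [], result => result
  | 0, _ :: _, result => result
  | n + 1, node :: rest, result =>
    let result := result ++ [node]
    let stack :=
      (if (PySem.Dict.mk order_relation).contains node
       then (PySem.Dict.mk order_relation).getD node [] else []) ++ rest
    get_succeedsLoop order_relation n stack result

def get_succeeds_alt (job : Int) (order_relation : List (Int × List Int)) : List Int :=
  get_succeedsLoop order_relation
    (get_succeedsSize order_relation (order_relation.length + 1) job) [job] []

-- ===== PRECONDITION & SPEC =====
-- `acyFrom rel fuel path x`: path-tracking depth-first acyclicity test — true iff no node is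
-- revisited along any ancestor path starting at x.  Fuel `rel.length` always suffices: each
-- recursion step adds a distinct keyed node to `path`, and there are at most rel.length keys.
def acyFrom (rel : List (Int × List Int)) : Nat → List Int → Int → Bool
  | 0, path, x => !path.contains x && ((PySem.Dict.mk rel).getD x []).isEmpty
  | n + 1, path, x =>
    !path.contains x && ((PySem.Dict.mk rel).getD x []).all (acyFrom rel n (x :: path))

-- Pre_ excludes exactly the relations with a cycle reachable from job: there A raises
-- RecursionError (and B's while-loop does not terminate), so A returns no value.
def Pre_get_succeeds (job : Int) (order_relation : List (Int × List Int)) : Prop :=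
  acyFrom order_relation order_relation.length [] job = true

instance (job : Int) (order_relation : List (Int × List Int)) : Decidable (Pre_get_succeeds job order_relation) := by
  unfold Pre_get_succeeds; infer_instance

def pvWitness_get_succeeds : Int × (List (Int × List Int)) :=
  (1, [(2, [3, 9]), (1, [2, 3]), (3, [])])

def Spec_get_succeeds (job : Int) (order_relation : List (Int × List Int)) (out : List Int) : Prop := out = get_succeeds_alt job order_relation
instance (job : Int) (order_relation : List (Int × List Int)) (out : List Int) : Decidable (Spec_get_succeeds job order_relation out) := by unfold Spec_get_succeeds; infer_instance

-- ===== CLAIM (what is proved, stated in full; the proofs are below) =====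
def Claim_equal_get_succeeds : Prop := ∀ (job : Int) (order_relation : List (Int × List Int)), Dom_get_succeeds job order_relation → Pre_get_succeeds job order_relation → Spec_get_succeeds job order_relation (get_succeeds job order_relation)

-- ===== LEMMAS AND PROOFS =====

-- successors of x: the looked-up list (default [])
def succsOf (rel : List (Int × List Int)) (x : Int) : List Int :=
  (PySem.Dict.mk rel).getD x []

-- `DeepP rel n x`: the DFS tree below x has depth ≤ n (proof-only notion)
def DeepP (rel : List (Int × List Int)) : Nat → Int → Prop
  | 0, x => succsOf rel x = []
  | n + 1, x => ∀ e ∈ succsOf rel x, DeepP rel n e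

theorem ite_contains_getD (rel : List (Int × List Int)) (x : Int) :
    (if (PySem.Dict.mk rel).contains x
     then (PySem.Dict.mk rel).getD x [] else []) = succsOf rel x := by
  by_cases h : (PySem.Dict.mk rel).contains x = true
  · simp [h, succsOf]
  · simp only [Bool.not_eq_true] at h
    rw [if_neg (by simp [h]), succsOf, PySem.Dict.getD_of_not_contains]
    exact h

-- soundness of the acyclicity test: a passing node's DFS tree has depth ≤ the fuel used
theorem deep_of_acy (rel : List (Int × List Int)) :
    ∀ (n : Nat) (path : List Int) (x : Int),
      acyFrom rel n path x = true → DeepP rel n x := by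
  intro n
  induction n with
  | zero =>
    intro path x h
    simp only [acyFrom, Bool.and_eq_true, List.isEmpty_iff] at h
    exact h.2
  | succ n ih =>
    intro path x h
    simp only [acyFrom, Bool.and_eq_true, List.all_eq_true] at h
    intro e he
    exact ih (x :: path) e (h.2 e he)

-- A's body, the if-branches merged into one fold
theorem dfs_eq (rel : List (Int × List Int)) (n : Nat) (x : Int) :
    get_succeedsGo rel (n + 1) x =
      (succsOf rel x).foldl (fun acc e => acc ++ get_succeedsGo rel n e) [x] := by
  simp only [get_succeedsGo, ite_contains_getD rel x]
  by_cases h : (succsOf rel x).length > 0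
  · simp [h]
  · have hnil : succsOf rel x = [] := by
      cases hs : succsOf rel x with
      | nil => rfl
      | cons a t => rw [hs] at h; simp at h
    simp [hnil]

theorem dfs_cons (rel : List (Int × List Int)) (n : Nat) (x : Int) :
    get_succeedsGo rel (n + 1) x =
      x :: (succsOf rel x).flatMap (get_succeedsGo rel n) := by
  rw [dfs_eq, PySem.List.foldl_append_eq_flatMap]
  rfl

-- length-of-fold helper
theorem length_foldl_append {α β : Type} (g : β → List α) (l : List β) :
    ∀ init : List α,
      (l.foldl (fun acc e => acc ++ g e) init).length =
        l.foldl (fun acc e => acc + (g e).length) init.length := by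
  induction l with
  | nil => intro init; rfl
  | cons a t ih => intro init; simp only [List.foldl_cons, ih, List.length_append]

-- the fuel bound of B equals the length of A's output at the same fuel (unconditionally)
theorem size_eq_length (rel : List (Int × List Int)) :
    ∀ (n : Nat) (x : Int),
      get_succeedsSize rel n x = (get_succeedsGo rel n x).length := by
  intro n
  induction n with
  | zero => intro x; rfl
  | succ n ih =>
    intro x
    rw [dfs_eq, get_succeedsSize, length_foldl_append]
    simp only [List.length_singleton]
    exact PySem.List.foldl_congr_mem (succsOf rel x)
      (fun acc e => acc + get_succeedsSize rel n e)
      (fun acc e => acc + (get_succeedsGo rel n e).length)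
      1 (fun acc e _ => by simp only []; rw [ih e])

-- one iteration of B's while-loop
theorem loop_step (rel : List (Int × List Int)) (m : Nat) (node : Int)
    (rest res : List Int) :
    get_succeedsLoop rel (m + 1) (node :: rest) res =
      get_succeedsLoop rel m (succsOf rel node ++ rest) (res ++ [node]) := by
  simp only [get_succeedsLoop, ite_contains_getD rel node]

theorem loop_fuel_congr (rel : List (Int × List Int)) {m m' : Nat}
    (h : m = m') (s res : List Int) :
    get_succeedsLoop rel m s res = get_succeedsLoop rel m' s res := by rw [h]

-- main invariant: processing a stack whose nodes all have depth ≤ n consumes exactly the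
-- length of their concatenated DFS outputs in fuel and appends those outputs to result.
theorem loop_run (rel : List (Int × List Int)) :
    ∀ (n : Nat) (s rest res : List Int) (f : Nat),
      (∀ e ∈ s, DeepP rel n e) →
      get_succeedsLoop rel ((s.flatMap (get_succeedsGo rel (n + 1))).length + f) (s ++ rest) res =
        get_succeedsLoop rel f rest (res ++ s.flatMap (get_succeedsGo rel (n + 1))) := by
  intro n
  induction n with
  | zero =>
    intro s
    induction s with
    | nil => intro rest res f _; simp
    | cons x t iht =>
      intro rest res f hdeep
      have hx : succsOf rel x = [] := hdeep x (by simp)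
      have hxd : get_succeedsGo rel (0 + 1) x = [x] := by rw [dfs_cons, hx]; rfl
      simp only [List.flatMap_cons, hxd]
      rw [List.length_append, List.length_singleton, List.cons_append]
      rw [loop_fuel_congr rel
        (show 1 + (t.flatMap (get_succeedsGo rel (0 + 1))).length + f
            = ((t.flatMap (get_succeedsGo rel (0 + 1))).length + f) + 1 from by omega)]
      rw [loop_step, hx, List.nil_append]
      rw [iht rest (res ++ [x]) f (fun e he => hdeep e (by simp [he]))]
      simp
  | succ n ih =>
    intro s
    induction s with
    | nil => intro rest res f _; simp
    | cons x t iht =>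
      intro rest res f hdeep
      have hx : ∀ e ∈ succsOf rel x, DeepP rel n e := hdeep x (by simp)
      have hxd : get_succeedsGo rel (n + 1 + 1) x
          = x :: (succsOf rel x).flatMap (get_succeedsGo rel (n + 1)) := dfs_cons rel (n + 1) x
      simp only [List.flatMap_cons, hxd]
      rw [List.length_append, List.length_cons, List.cons_append]
      rw [loop_fuel_congr rel
        (show ((succsOf rel x).flatMap (get_succeedsGo rel (n + 1))).length + 1
              + (t.flatMap (get_succeedsGo rel (n + 1 + 1))).length + f
            = (((succsOf rel x).flatMap (get_succeedsGo rel (n + 1))).length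
                + ((t.flatMap (get_succeedsGo rel (n + 1 + 1))).length + f)) + 1 from by omega)]
      rw [loop_step]
      rw [ih (succsOf rel x) (t ++ rest) (res ++ [x]) _ hx]
      rw [iht rest (res ++ [x] ++ (succsOf rel x).flatMap (get_succeedsGo rel (n + 1))) f
        (fun e he => hdeep e (by simp [he]))]
      simp

theorem loop_nil_fuel (rel : List (Int × List Int)) (f : Nat) (res : List Int) :
    get_succeedsLoop rel f [] res = res := by
  cases f <;> rfl

-- ===== VERDICT (by name: the statement is the Claim_ definition above) =====
theorem get_succeeds_spec : Claim_equal_get_succeeds := by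
  intro job rel _hdom hpre
  unfold Spec_get_succeeds get_succeeds get_succeeds_alt
  have hdeep : DeepP rel rel.length job := deep_of_acy rel rel.length [] job hpre
  have hall : ∀ e ∈ [job], DeepP rel rel.length e := by
    intro e he; simp only [List.mem_singleton] at he; subst he; exact hdeep
  have hrun := loop_run rel rel.length [job] [] [] 0 hall
  simp only [List.flatMap_cons, List.flatMap_nil, List.append_nil, List.nil_append,
    Nat.add_zero] at hrun
  rw [size_eq_length, hrun, loop_nil_fuel]
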